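-- pv_equiv track=rewrite | github.com/systematic-chaos/amazon-training-exercises | positive_subsequence_sum.py | positive_sequence_max_sum
-- ===== SOURCE A (Python) =====
-- def positive_sequence_max_sum(num_list: list) -> int:
--     if all(num < 0 for num in num_list):
--         return max(num_list)
--
--     max_sum = 0
--     current_sum = 0
--     for num in num_list:
--         if num >= 0:
--             current_sum += num
--         else:
--             max_sum = max(max_sum, current_sum)
--             current_sum = 0
--     max_sum = max(current_sum, max_sum)
--     return max_sum
-- ===== SOURCE B (Python) =====
-- def positive_sequence_max_sum(num_list: list) -> int:
--     m = max(num_list)              # raises ValueError on [], like A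
--     if m < 0:
--         return m                   # all elements negative
--     # prefix sums of the values clamped at 0: T[k] = sum of max(x, 0) over the first k items
--     T = [0]
--     for x in num_list:
--         T.append(T[-1] + (x if x >= 0 else 0))
--     # boundaries: start, every index holding a negative value, end; each maximal
--     # non-negative run sum is the difference of T at two consecutive boundaries
--     bounds = [0] + [i for i, x in enumerate(num_list) if x < 0] + [len(num_list)]
--     return max(T[j] - T[i] for i, j in zip(bounds, bounds[1:]))
-- ===== Notes on version B (the rewrite author's own statement) =====
-- stated objective: alternative
-- what changed: B replaces A's single running-accumulator pass by staged passes over different data: a prefix-sum table of the values clamped at 0, the list of indices of negative elements as run boundaries, and a max over differences of the table at consecutive boundaries (the all-negative case is handled by taking max(num_list) first).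
import Mathlib
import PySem

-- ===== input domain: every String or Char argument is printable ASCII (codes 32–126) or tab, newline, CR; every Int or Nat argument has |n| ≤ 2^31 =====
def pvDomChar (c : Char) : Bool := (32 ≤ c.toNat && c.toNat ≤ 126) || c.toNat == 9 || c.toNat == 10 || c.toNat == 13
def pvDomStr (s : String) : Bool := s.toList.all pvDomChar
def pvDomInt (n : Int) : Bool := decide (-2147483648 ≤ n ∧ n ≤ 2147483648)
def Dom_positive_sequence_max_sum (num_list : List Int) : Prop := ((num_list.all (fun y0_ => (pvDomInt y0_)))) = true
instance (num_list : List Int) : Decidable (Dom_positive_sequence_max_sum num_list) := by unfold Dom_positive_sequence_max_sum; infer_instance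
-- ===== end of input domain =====

-- B replaces A's single accumulator pass by staged passes: a prefix-sum table of
-- the values clamped at 0, the negative positions as run boundaries, and a max of
-- differences of the table at consecutive boundaries (alternative, same cost).

-- ===== PORT A =====
def positive_sequence_max_sum (num_list : List Int) : Int :=
  if num_list.all (fun num => decide (num < 0)) then
    -- Python: max(num_list); raises ValueError on [], excluded by Pre_
    (PySem.List.max? num_list (fun y => y)).getD 0
  else
    let p := num_list.foldl
      (fun (p : Int × Int) num =>
        if num ≥ 0 then (p.1, p.2 + num) else (max p.1 p.2, 0))
      (0, 0)
    max p.2 p.1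

-- ===== PORT B =====
-- T.append(T[-1] + (x if x >= 0 else 0))
def pvTstep (acc : List Int) (x : Int) : List Int :=
  acc ++ [acc.getLast! + (if x ≥ 0 then x else 0)]

-- [i for i, x in enumerate(num_list) if x < 0]
def pvCuts (num_list : List Int) : List Int :=
  (PySem.List.enumerate num_list 0).filterMap (fun p => if p.2 < 0 then some p.1 else none)

def positive_sequence_max_sum_alt (num_list : List Int) : Int :=
  match PySem.List.max? num_list (fun y => y) with
  | none => 0   -- Python: max([]) raises ValueError; excluded by Pre_
  | some m =>
    if m < 0 then m
    else
      let T := num_list.foldl pvTstep [0]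
      let bounds : List Int := [0] ++ pvCuts num_list ++ [(num_list.length : Int)]
      -- T[j] - T[i]: both indices are always in range, so the .getD 0 is never used
      (PySem.List.max? ((bounds.zip bounds.tail).map
          (fun p => (PySem.List.pyGet? T p.2).getD 0 - (PySem.List.pyGet? T p.1).getD 0))
        (fun y => y)).getD 0

-- ===== PRECONDITION & SPEC =====
-- Pre_ excludes only the empty list, on which both A and B raise ValueError (max of empty sequence).
def Pre_positive_sequence_max_sum (num_list : List Int) : Prop := num_list ≠ []
instance (num_list : List Int) : Decidable (Pre_positive_sequence_max_sum num_list) := by unfold Pre_positive_sequence_max_sum; infer_instance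
def pvWitness_positive_sequence_max_sum : List Int := ([1, -2, 3])

def Spec_positive_sequence_max_sum (num_list : List Int) (out : Int) : Prop := out = positive_sequence_max_sum_alt num_list
instance (num_list : List Int) (out : Int) : Decidable (Spec_positive_sequence_max_sum num_list out) := by unfold Spec_positive_sequence_max_sum; infer_instance

-- ===== CLAIM (what is proved, stated in full; the proofs are below) =====
def Claim_equal_positive_sequence_max_sum : Prop := ∀ (num_list : List Int), Dom_positive_sequence_max_sum num_list → Pre_positive_sequence_max_sum num_list → Spec_positive_sequence_max_sum num_list (positive_sequence_max_sum num_list)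

-- ===== LEMMAS AND PROOFS =====

-- A's loop body, and the list of maximal non-negative run sums (the common spec
-- both programs are reduced to).
def pvStepA (p : Int × Int) (num : Int) : Int × Int :=
  if num ≥ 0 then (p.1, p.2 + num) else (max p.1 p.2, 0)

def pvStepB (acc : List Int) (x : Int) : List Int :=
  if x ≥ 0 then acc.dropLast ++ [acc.getLast! + x] else acc ++ [0]

-- sum of the list with negatives clamped to 0
def pvClampS (xs : List Int) : Int := (xs.map (fun x => max x 0)).sum

-- max of a nonempty list the way Python's max computes it
def pvMaxL : List Int → Int
  | [] => 0
  | a :: l => l.foldl max a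

theorem pv_foldl_max_max (l : List Int) : ∀ (b a : Int), l.foldl max (max b a) = max b (l.foldl max a) := by
  induction l with
  | nil => intro b a; rfl
  | cons c l ih =>
    intro b a
    simp only [List.foldl_cons]
    rw [max_assoc, ih]

theorem pvStepB_shift (xs : List Int) : ∀ (acc : List Int) (c : Int),
    xs.foldl pvStepB (acc ++ [c]) = acc ++ xs.foldl pvStepB [c] := by
  induction xs with
  | nil => intro acc c; rfl
  | cons x xs ih =>
    intro acc c
    simp only [List.foldl_cons]
    by_cases h : x ≥ 0
    · have : pvStepB (acc ++ [c]) x = acc ++ [c + x] := by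
        simp [pvStepB, h]
      rw [this, ih acc (c + x)]
      have : pvStepB [c] x = [c + x] := by simp [pvStepB, h]
      rw [this]
    · have h1 : pvStepB (acc ++ [c]) x = (acc ++ [c]) ++ [0] := by
        simp [pvStepB, h]
      have h2 : pvStepB [c] x = [c] ++ [0] := by simp [pvStepB, h]
      rw [h1, h2]
      rw [ih (acc ++ [c]) 0, ih [c] 0]
      simp

theorem pvRuns_ne_nil (xs : List Int) : ∀ (c : Int), xs.foldl pvStepB [c] ≠ [] := by
  induction xs with
  | nil => intro c; simp
  | cons x xs ih =>
    intro c
    simp only [List.foldl_cons]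
    by_cases h : x ≥ 0
    · have : pvStepB [c] x = [c + x] := by simp [pvStepB, h]
      rw [this]; exact ih (c + x)
    · have : pvStepB [c] x = [c] ++ [0] := by simp [pvStepB, h]
      rw [this, pvStepB_shift]
      simp

theorem pvRuns_nonneg (xs : List Int) : ∀ (c : Int), 0 ≤ c →
    ∀ y ∈ xs.foldl pvStepB [c], 0 ≤ y := by
  induction xs with
  | nil => intro c hc y hy; simp at hy; omega
  | cons x xs ih =>
    intro c hc y hy
    simp only [List.foldl_cons] at hy
    by_cases h : x ≥ 0
    · rw [show pvStepB [c] x = [c + x] by simp [pvStepB, h]] at hy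
      exact ih (c + x) (by omega) y hy
    · rw [show pvStepB [c] x = [c] ++ [0] by simp [pvStepB, h], pvStepB_shift] at hy
      rcases List.mem_append.1 hy with h1 | h2
      · simp at h1; omega
      · exact ih 0 le_rfl y h2

theorem pvMaxL_cons (c : Int) (g : List Int) (hg : g ≠ []) :
    pvMaxL (c :: g) = max c (pvMaxL g) := by
  cases g with
  | nil => exact absurd rfl hg
  | cons a l =>
    show (a :: l).foldl max c = max c (l.foldl max a)
    simp only [List.foldl_cons]
    exact pv_foldl_max_max l c a

-- relates A's accumulator loop to the run-sums list
theorem pvMain (xs : List Int) : ∀ (ms cs : Int),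
    (let p := xs.foldl pvStepA (ms, cs); max p.2 p.1)
      = max ms (pvMaxL (xs.foldl pvStepB [cs])) := by
  induction xs with
  | nil =>
    intro ms cs
    simp [pvMaxL, max_comm]
  | cons x xs ih =>
    intro ms cs
    simp only [List.foldl_cons]
    by_cases h : x ≥ 0
    · rw [show pvStepA (ms, cs) x = (ms, cs + x) by simp [pvStepA, h],
          show pvStepB [cs] x = [cs + x] by simp [pvStepB, h]]
      exact ih ms (cs + x)
    · rw [show pvStepA (ms, cs) x = (max ms cs, 0) by simp [pvStepA, h],
          show pvStepB [cs] x = [cs] ++ [0] by simp [pvStepB, h],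
          pvStepB_shift, List.singleton_append]
      rw [pvMaxL_cons cs _ (pvRuns_ne_nil xs 0)]
      rw [ih (max ms cs) 0]
      rw [max_assoc]

-- ===== B-side characterisation =====

-- the mapped function of B's last pass, named so lemmas can speak about it
def pvDiff (T : List Int) (p : Int × Int) : Int :=
  (PySem.List.pyGet? T p.2).getD 0 - (PySem.List.pyGet? T p.1).getD 0

theorem pvGetLast_concat (ys : List Int) (v : Int) : (ys ++ [v]).getLast! = v := by
  induction ys with
  | nil => rfl
  | cons a t ih =>
    cases t with
    | nil => simp [List.getLast!, List.getLast]
    | cons b u => simp [List.getLast!, List.getLast]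

theorem pvClampS_append (xs ys : List Int) :
    pvClampS (xs ++ ys) = pvClampS xs + pvClampS ys := by
  simp [pvClampS]

theorem pvClampS_singleton (x : Int) : pvClampS [x] = (if x ≥ 0 then x else 0) := by
  simp only [pvClampS, List.map_cons, List.map_nil, List.sum_cons, List.sum_nil, add_zero]
  split <;> omega

-- the prefix-sum table is the table of clamped prefix sums
theorem pvT_eq (xs : List Int) :
    xs.foldl pvTstep [0] = (List.range (xs.length + 1)).map (fun k => pvClampS (xs.take k)) := by
  induction xs using List.reverseRecOn with
  | nil => simp [pvClampS]
  | append_singleton xs x ih =>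
    have hrhs : (List.range ((xs ++ [x]).length + 1)).map (fun k => pvClampS ((xs ++ [x]).take k))
        = (List.range (xs.length + 1)).map (fun k => pvClampS (xs.take k))
          ++ [pvClampS xs + (if x ≥ 0 then x else 0)] := by
      rw [show (xs ++ [x]).length + 1 = (xs.length + 1) + 1 by simp, List.range_succ,
          List.map_append]
      congr 1
      · apply List.map_congr_left
        intro k hk
        rw [List.mem_range] at hk
        rw [List.take_append_of_le_length (by omega)]
      · rw [List.map_singleton, List.take_of_length_le (by simp), pvClampS_append,
            pvClampS_singleton]
    rw [List.foldl_append, List.foldl_cons, List.foldl_nil, ih, hrhs]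
    simp only [pvTstep]
    congr 2
    rw [show xs.length + 1 = xs.length + 1 from rfl, List.range_succ, List.map_append,
        List.map_singleton, pvGetLast_concat, List.take_length]

-- indexing the table: T[k] = clamped sum of the first k elements, for k ≤ len
theorem pvT_get (xs : List Int) (k : Nat) (hk : k ≤ xs.length) :
    (PySem.List.pyGet? (xs.foldl pvTstep [0]) (k : Int)).getD 0 = pvClampS (xs.take k) := by
  rw [pvT_eq, PySem.List.pyGet?_natCast, List.getElem?_map, List.getElem?_range (by omega)]
  rfl

theorem pvEnumerate_append (xs ys : List Int) : ∀ (s : Int),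
    PySem.List.enumerate (xs ++ ys) s
      = PySem.List.enumerate xs s ++ PySem.List.enumerate ys (s + xs.length) := by
  induction xs with
  | nil => intro s; simp [PySem.List.enumerate_nil]
  | cons x xs ih =>
    intro s
    rw [List.cons_append, PySem.List.enumerate_cons, PySem.List.enumerate_cons, ih (s + 1)]
    simp only [List.cons_append, List.length_cons]
    have : s + ((((xs.length : Nat) + 1 : Nat)) : Int) = s + 1 + (xs.length : Int) := by push_cast; ring
    rw [this]

theorem pvCuts_append (xs : List Int) (x : Int) :
    pvCuts (xs ++ [x]) = pvCuts xs ++ (if x < 0 then [(xs.length : Int)] else []) := by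
  unfold pvCuts
  rw [pvEnumerate_append, List.filterMap_append]
  congr 1
  rw [PySem.List.enumerate_cons, PySem.List.enumerate_nil]
  by_cases h : x < 0 <;> simp [h]

-- every cut index is a genuine index of xs
theorem pvCuts_range (xs : List Int) : ∀ c ∈ pvCuts xs, 0 ≤ c ∧ c < (xs.length : Int) := by
  intro c hc
  unfold pvCuts at hc
  rw [List.mem_filterMap] at hc
  obtain ⟨p, hp, hpc⟩ := hc
  have h1 : p.1 ∈ (PySem.List.enumerate xs 0).map (·.1) := List.mem_map_of_mem hp
  rw [PySem.List.map_fst_enumerate, PySem.List.mem_pyRange_one] at h1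
  by_cases h : p.2 < 0
  · simp [h] at hpc
    subst hpc
    simpa using h1
  · simp [h] at hpc

-- consecutive pairs of a list extended by one element
theorem pvPairs_append (l : List Int) (a : Int) (hl : l ≠ []) :
    (l ++ [a]).zip (l ++ [a]).tail = l.zip l.tail ++ [(l.getLast hl, a)] := by
  induction l with
  | nil => exact absurd rfl hl
  | cons b t ih =>
    cases t with
    | nil => simp
    | cons c t' =>
      have := ih (by simp)
      simp only [List.cons_append, List.tail_cons, List.zip_cons_cons] at this ⊢
      rw [this]
      simp [List.getLast]

-- the list of consecutive-boundary differences IS the run-sums list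
theorem pvDiffs_eq_runs (xs : List Int) :
    ((([0] ++ pvCuts xs ++ [(xs.length : Int)]).zip
        ([0] ++ pvCuts xs ++ [(xs.length : Int)]).tail).map (pvDiff (xs.foldl pvTstep [0])))
      = xs.foldl pvStepB [0] := by
  induction xs using List.reverseRecOn with
  | nil => simp [pvCuts, PySem.List.enumerate_nil, pvDiff]
  | append_singleton xs x ih =>
    set l : List Int := [0] ++ pvCuts xs with hl
    have hlne : l ≠ [] := by simp [hl]
    have hlrange : ∀ c ∈ l, 0 ≤ c ∧ c ≤ (xs.length : Int) := by
      intro c hc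
      rw [hl] at hc
      rcases List.mem_append.1 hc with h1 | h2
      · simp at h1; omega
      · have := pvCuts_range xs c h2; omega
    have hglast := hlrange _ (List.getLast_mem hlne)
    -- the new table agrees with the old one on indices ≤ len xs
    have hTagree : ∀ c : Int, 0 ≤ c → c ≤ (xs.length : Int) →
        (PySem.List.pyGet? ((xs ++ [x]).foldl pvTstep [0]) c).getD 0
          = (PySem.List.pyGet? (xs.foldl pvTstep [0]) c).getD 0 := by
      intro c h0 hle
      obtain ⟨k, rfl⟩ : ∃ k : Nat, c = (k : Int) := ⟨c.toNat, by omega⟩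
      have hk : k ≤ xs.length := by exact_mod_cast hle
      rw [pvT_get xs k hk, pvT_get (xs ++ [x]) k (by simp; omega),
          List.take_append_of_le_length hk]
    have hTold : (PySem.List.pyGet? (xs.foldl pvTstep [0]) ((xs.length : Int))).getD 0
        = pvClampS xs := by
      have := pvT_get xs xs.length le_rfl
      rwa [List.take_length] at this
    have hTtop : (PySem.List.pyGet? ((xs ++ [x]).foldl pvTstep [0])
          (((xs ++ [x]).length : Int))).getD 0 = pvClampS xs + (if x ≥ 0 then x else 0) := by
      rw [pvT_get (xs ++ [x]) (xs ++ [x]).length le_rfl, List.take_length, pvClampS_append,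
          pvClampS_singleton]
    -- agreement of pvDiff on pairs drawn from l
    have hpre : (l.zip l.tail).map (pvDiff ((xs ++ [x]).foldl pvTstep [0]))
        = (l.zip l.tail).map (pvDiff (xs.foldl pvTstep [0])) := by
      apply List.map_congr_left
      intro p hp
      have h1 := List.of_mem_zip hp
      obtain ⟨h1a, h1b⟩ := hlrange _ h1.1
      obtain ⟨h2a, h2b⟩ := hlrange _ (List.mem_of_mem_tail h1.2)
      unfold pvDiff
      rw [hTagree _ h1a h1b, hTagree _ h2a h2b]
    -- old diffs, split at the last pair
    have hold : (l.zip l.tail).map (pvDiff (xs.foldl pvTstep [0]))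
          ++ [pvDiff (xs.foldl pvTstep [0]) (l.getLast hlne, (xs.length : Int))]
        = xs.foldl pvStepB [0] := by
      have h := ih
      rw [pvPairs_append l _ hlne, List.map_append] at h
      simp only [List.map_singleton] at h
      exact h
    have hruns : (xs ++ [x]).foldl pvStepB [0] = pvStepB (xs.foldl pvStepB [0]) x := by
      rw [List.foldl_append, List.foldl_cons, List.foldl_nil]
    have hTfold : (xs ++ [x]).foldl pvTstep [0] = pvTstep (xs.foldl pvTstep [0]) x := by
      rw [List.foldl_append, List.foldl_cons, List.foldl_nil]
    rw [hruns]
    rw [← hTfold] at *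
    by_cases hx : x ≥ 0
    · -- same cuts; the last run sum grows by x
      have hcuts : pvCuts (xs ++ [x]) = pvCuts xs := by
        rw [pvCuts_append]; simp [show ¬ x < 0 by omega]
      rw [show [0] ++ pvCuts (xs ++ [x]) ++ [((xs ++ [x]).length : Int)]
            = l ++ [((xs ++ [x]).length : Int)] by simp [hl, hcuts]]
      rw [pvPairs_append l _ hlne, List.map_append, hpre]
      rw [show pvStepB (xs.foldl pvStepB [0]) x
            = (xs.foldl pvStepB [0]).dropLast ++ [(xs.foldl pvStepB [0]).getLast! + x]
          by simp [pvStepB, hx]]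
      rw [← hold, List.dropLast_concat, pvGetLast_concat]
      congr 1
      simp only [List.map_singleton]
      congr 1
      unfold pvDiff
      rw [hTtop, hTagree _ hglast.1 hglast.2, hTold]
      rw [show (if x ≥ 0 then x else 0) = x by simp [hx]]
      ring
    · -- a new cut at position len xs; a new run sum 0 is appended
      have hcuts : pvCuts (xs ++ [x]) = pvCuts xs ++ [(xs.length : Int)] := by
        rw [pvCuts_append]; simp [show x < 0 by omega]
      rw [show [0] ++ pvCuts (xs ++ [x]) ++ [((xs ++ [x]).length : Int)]
            = (l ++ [(xs.length : Int)]) ++ [((xs ++ [x]).length : Int)] by simp [hl, hcuts]]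
      rw [pvPairs_append (l ++ [(xs.length : Int)]) _ (by simp),
          List.getLast_append_singleton, List.map_append,
          pvPairs_append l _ hlne, List.map_append, hpre]
      simp only [List.map_singleton]
      have hlastpair : pvDiff ((xs ++ [x]).foldl pvTstep [0]) (l.getLast hlne, (xs.length : Int))
          = pvDiff (xs.foldl pvTstep [0]) (l.getLast hlne, (xs.length : Int)) := by
        unfold pvDiff
        rw [hTagree _ (by positivity) le_rfl, hTagree _ hglast.1 hglast.2]
      rw [← hTfold] at hlastpair
      rw [hlastpair, hold]
      rw [show pvStepB (xs.foldl pvStepB [0]) x = xs.foldl pvStepB [0] ++ [0]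
          by simp [pvStepB, show ¬ x ≥ 0 by omega]]
      congr 2
      unfold pvDiff
      rw [hTtop, hTagree _ (by positivity) le_rfl, hTold]
      simp [show ¬ x ≥ 0 by omega]

-- ===== VERDICT =====
theorem positive_sequence_max_sum_spec : Claim_equal_positive_sequence_max_sum := by
  intro num_list _ hpre
  unfold Spec_positive_sequence_max_sum Pre_positive_sequence_max_sum at *
  obtain ⟨a, t, rfl⟩ := List.exists_cons_of_ne_nil hpre
  unfold positive_sequence_max_sum positive_sequence_max_sum_alt
  rw [PySem.List.max?_id_cons]
  set m : Int := t.foldl max a with hm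
  by_cases hall : (a :: t).all (fun num => decide (num < 0))
  · have hmlt : m < 0 := by
      rcases PySem.List.foldl_max_mem t a with h | h
      · rw [hm, h]
        have := (List.all_eq_true.1 hall) a (by simp)
        simpa using this
      · rw [hm]
        have := (List.all_eq_true.1 hall) (t.foldl max a) (by simp [h])
        simpa using this
    simp only [hall, if_true, hmlt, if_true]
    rfl
  · have hnn : ¬ m < 0 := by
      simp only [List.all_eq_true, not_forall] at hall
      obtain ⟨y, hy, hylt⟩ := hall
      have hy0 : 0 ≤ y := by simpa using hylt
      have hle : y ≤ m := by
        rw [hm]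
        rcases List.mem_cons.1 hy with rfl | hyt
        · exact (PySem.List.le_foldl_max t y).1
        · exact (PySem.List.le_foldl_max t a).2 y hyt
      omega
    simp only [hall, if_false, hnn, if_false]
    have hA := pvMain (a :: t) 0 0
    simp only at hA
    have hfA : (a :: t).foldl
        (fun (p : Int × Int) num => if num ≥ 0 then (p.1, p.2 + num) else (max p.1 p.2, 0)) (0, 0)
        = (a :: t).foldl pvStepA (0, 0) := rfl
    rw [hfA]
    rw [show (fun (p : Int × Int) =>
          (PySem.List.pyGet? ((a :: t).foldl pvTstep [0]) p.2).getD 0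
            - (PySem.List.pyGet? ((a :: t).foldl pvTstep [0]) p.1).getD 0)
        = pvDiff ((a :: t).foldl pvTstep [0]) from rfl]
    rw [pvDiffs_eq_runs (a :: t)]
    obtain ⟨b, l, hbl⟩ := List.exists_cons_of_ne_nil (pvRuns_ne_nil (a :: t) 0)
    rw [hbl] at hA ⊢
    rw [PySem.List.max?_id_cons, Option.getD_some]
    rw [hA]
    have hb0 : 0 ≤ b := pvRuns_nonneg (a :: t) 0 le_rfl b (by rw [hbl]; simp)
    have : (0 : Int) ≤ pvMaxL (b :: l) := by
      have := (PySem.List.le_foldl_max l b).1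
      simpa [pvMaxL] using le_trans hb0 this
    simp [pvMaxL] at this ⊢
    omega
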